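-- pv_equiv track=rewrite | github.com/Esawer/anacondas-and-pythons | src/tic_tac_toe.py | point_win_checker
-- ===== SOURCE A (Python) =====
-- def point_win_checker(check_value: list, points: int):
--     player_points = 0
--     player_char = ""
--
--     for i, j in enumerate(check_value):
--         if j == " ":
--             continue
--         else:
--             if player_char == j:
--                 player_points += 1
--             else:
--                 player_char = j
--                 player_points = 1
--
--             if player_points >= points:
--                 return True
--
--     return False
-- ===== SOURCE B (Python) =====
-- def point_win_checker(check_value: list, points: int):
--     # Two-phase: drop spaces first, then run-length encode and test the runs.
--     cleaned = [c for c in check_value if c != " "]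
--     n = len(cleaned)
--     lengths = []
--     i = 0
--     while i < n:
--         j = i + 1
--         while j < n and cleaned[j] == cleaned[i]:
--             j += 1
--         lengths.append(j - i)
--         i = j
--     return any(r >= points for r in lengths)
-- ===== Notes on version B (the rewrite author's own statement) =====
-- stated objective: alternative
-- what changed: Replaces A's single stateful scan (current-char/counter with early return) by a two-phase decomposition: filter spaces, run-length-encode the remainder, then test whether any run length reaches points.
import Mathlib
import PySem

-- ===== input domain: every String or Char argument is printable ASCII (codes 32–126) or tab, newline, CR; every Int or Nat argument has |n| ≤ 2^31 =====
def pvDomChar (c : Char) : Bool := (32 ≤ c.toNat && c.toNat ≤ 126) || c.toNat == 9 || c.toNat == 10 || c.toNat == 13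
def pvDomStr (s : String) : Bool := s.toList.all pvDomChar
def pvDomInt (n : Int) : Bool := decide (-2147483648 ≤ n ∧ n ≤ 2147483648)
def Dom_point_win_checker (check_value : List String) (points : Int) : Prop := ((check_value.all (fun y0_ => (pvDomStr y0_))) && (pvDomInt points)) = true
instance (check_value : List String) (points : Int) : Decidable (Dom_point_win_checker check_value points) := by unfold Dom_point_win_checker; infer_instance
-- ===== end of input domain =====

-- B differs from A by decomposition: filter spaces, run-length-encode, then test the run lengths.

-- ===== PORT A =====
-- A's for-loop over enumerate(check_value) (the index i is unused) with early return,
-- carrying the mutable state (player_points, player_char).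
def pwcGo (points : Int) : List String → Int → String → Bool
  | [], _, _ => false
  | j :: rest, player_points, player_char =>
    if j == " " then pwcGo points rest player_points player_char
    else if player_char == j then
      (if player_points + 1 ≥ points then true
       else pwcGo points rest (player_points + 1) player_char)
    else
      (if (1 : Int) ≥ points then true
       else pwcGo points rest 1 j)

def point_win_checker (check_value : List String) (points : Int) : Bool :=
  pwcGo points check_value 0 ""

-- ===== PORT B =====
-- Source B's inner while loop: number of leading elements of the list equal to head.
def pwcCountRun (head : String) : List String → Nat
  | [] => 0
  | x :: xs => if x == head then 1 + pwcCountRun head xs else 0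

-- Source B's outer while loop: the list of run lengths of consecutive equal elements.
def pwcRunLengths : List String → List Nat
  | [] => []
  | head :: tl =>
    (1 + pwcCountRun head tl) :: pwcRunLengths (tl.drop (pwcCountRun head tl))
termination_by l => l.length
decreasing_by
  simp only [List.length_cons, List.length_drop]
  omega

def point_win_checker_alt (check_value : List String) (points : Int) : Bool :=
  let cleaned := check_value.filter (fun c => !(c == " "))
  (pwcRunLengths cleaned).any (fun r => decide ((r : Int) ≥ points))

-- ===== PRECONDITION & SPEC =====
def Spec_point_win_checker (check_value : List String) (points : Int) (out : Bool) : Prop := out = point_win_checker_alt check_value points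
instance (check_value : List String) (points : Int) (out : Bool) : Decidable (Spec_point_win_checker check_value points out) := by unfold Spec_point_win_checker; infer_instance

-- ===== CLAIM (what is proved, stated in full; the proofs are below) =====
def Claim_equal_point_win_checker : Prop := ∀ (check_value : List String) (points : Int), Dom_point_win_checker check_value points → Spec_point_win_checker check_value points (point_win_checker check_value points)

-- ===== LEMMAS AND PROOFS =====

-- A's scan restricted to space-free lists (the `continue` branch removed).
def pwcGo' (points : Int) : List String → Int → String → Bool
  | [], _, _ => false
  | j :: rest, player_points, player_char =>
    if player_char == j then
      (if player_points + 1 ≥ points then true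
       else pwcGo' points rest (player_points + 1) player_char)
    else
      (if (1 : Int) ≥ points then true
       else pwcGo' points rest 1 j)

theorem pwcGo_filter (points : Int) (l : List String) (pp : Int) (pc : String) :
    pwcGo points l pp pc = pwcGo' points (l.filter (fun c => !(c == " "))) pp pc := by
  induction l generalizing pp pc with
  | nil => rfl
  | cons j rest ih =>
    by_cases hj : j = " "
    · subst hj
      simp [pwcGo, List.filter, ih]
    · have hb : (j == " ") = false := by simp [hj]
      simp only [pwcGo, List.filter, hb, Bool.not_false, pwcGo']
      by_cases hc : (pc == j) = true <;> simp [hc, ih]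

def pwcAny (points : Int) (rs : List Nat) : Bool :=
  rs.any (fun r => decide ((r : Int) ≥ points))

-- arithmetic shape of the "same character" step
theorem pwcKey1 (points pp : Int) (c : Nat) (x : Bool) :
    (if pp + 1 ≥ points then true
     else (decide (1 ≤ c) && decide (pp + 1 + (c : Int) ≥ points) || x))
    = (decide (1 ≤ 1 + c) && decide (pp + ((1 + c : Nat) : Int) ≥ points) || x) := by
  have h2 : (1 ≤ 1 + c) := by omega
  split_ifs with h
  · simp [h2]
    left; omega
  · rcases Nat.eq_zero_or_pos c with h0 | h1
    · subst h0
      simp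
      exact fun hx => absurd hx h
    · have e : (pp + 1 + (c : Int) ≥ points) ↔ (pp + ((1 + c : Nat) : Int) ≥ points) := by
        push_cast; omega
      have hd : decide (pp + 1 + (c : Int) ≥ points)
              = decide (pp + ((1 + c : Nat) : Int) ≥ points) := by
        rw [decide_eq_decide]; exact e
      rw [hd]
      simp [show 1 ≤ c from h1, h2]

-- arithmetic shape of the "new character" step
theorem pwcKey2 (points : Int) (c : Nat) (x : Bool) :
    (if (1 : Int) ≥ points then true
     else (decide (1 ≤ c) && decide ((1 : Int) + (c : Int) ≥ points) || x))
    = (decide (((1 + c : Nat) : Int) ≥ points) || x) := by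
  split_ifs with h
  · simp
    left; omega
  · rcases Nat.eq_zero_or_pos c with h0 | h1
    · subst h0
      simp
      exact fun hx => absurd hx h
    · have e : ((1 : Int) + (c : Int) ≥ points) ↔ (((1 + c : Nat) : Int) ≥ points) := by
        push_cast; omega
      have hd : decide ((1 : Int) + (c : Int) ≥ points)
              = decide (((1 + c : Nat) : Int) ≥ points) := by
        rw [decide_eq_decide]; exact e
      rw [hd]
      simp [show 1 ≤ c from h1]

-- The key invariant: A's space-free scan from state (pp, pc) is decided by how far the
-- current run of pc extends and by the run lengths of what follows.
theorem pwcGo'_char (points : Int) (l : List String) (pp : Int) (pc : String) :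
    pwcGo' points l pp pc =
      ((decide (1 ≤ pwcCountRun pc l) && decide (pp + (pwcCountRun pc l : Int) ≥ points))
       || pwcAny points (pwcRunLengths (l.drop (pwcCountRun pc l)))) := by
  induction l generalizing pp pc with
  | nil => simp [pwcGo', pwcCountRun, pwcRunLengths, pwcAny]
  | cons j rest ih =>
    by_cases hc : pc = j
    · subst hc
      have hcnt : pwcCountRun pc (pc :: rest) = 1 + pwcCountRun pc rest := by
        simp [pwcCountRun]
      have hdrop : (pc :: rest).drop (1 + pwcCountRun pc rest) = rest.drop (pwcCountRun pc rest) := by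
        simp [Nat.add_comm]
      rw [pwcGo', hcnt, hdrop]
      simp only [BEq.refl, if_true]
      calc (if pp + 1 ≥ points then true else pwcGo' points rest (pp + 1) pc)
          = (if pp + 1 ≥ points then true
             else (decide (1 ≤ pwcCountRun pc rest)
                   && decide (pp + 1 + (pwcCountRun pc rest : Int) ≥ points)
                   || pwcAny points (pwcRunLengths (rest.drop (pwcCountRun pc rest))))) := by
            rw [ih]
        _ = _ := pwcKey1 points pp (pwcCountRun pc rest) _
    · have hb : (pc == j) = false := by simp [hc]
      have hb' : (j == pc) = false := by simp [Ne.symm hc]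
      have hcnt : pwcCountRun pc (j :: rest) = 0 := by simp [pwcCountRun, hb']
      rw [pwcGo', hcnt]
      rw [if_neg (by simp [hb])]
      simp only [List.drop_zero]
      have hrl : pwcRunLengths (j :: rest)
          = (1 + pwcCountRun j rest) :: pwcRunLengths (rest.drop (pwcCountRun j rest)) := by
        rw [pwcRunLengths]
      rw [hrl]
      have hany : pwcAny points ((1 + pwcCountRun j rest) :: pwcRunLengths (rest.drop (pwcCountRun j rest)))
          = (decide (((1 + pwcCountRun j rest : Nat) : Int) ≥ points)
             || pwcAny points (pwcRunLengths (rest.drop (pwcCountRun j rest)))) := by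
        simp [pwcAny]
      rw [hany]
      have hz : (decide (1 ≤ (0 : Nat)) && decide (pp + ((0 : Nat) : Int) ≥ points)) = false := by
        simp
      rw [hz, Bool.false_or]
      calc (if (1 : Int) ≥ points then true else pwcGo' points rest 1 j)
          = (if (1 : Int) ≥ points then true
             else (decide (1 ≤ pwcCountRun j rest)
                   && decide ((1 : Int) + (pwcCountRun j rest : Int) ≥ points)
                   || pwcAny points (pwcRunLengths (rest.drop (pwcCountRun j rest))))) := by
            rw [ih]
        _ = _ := pwcKey2 points (pwcCountRun j rest) _

-- From the initial state (0, "") the invariant collapses to "some run reaches points".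
theorem pwcGo'_start (points : Int) (l : List String) :
    pwcGo' points l 0 "" = pwcAny points (pwcRunLengths l) := by
  rw [pwcGo'_char]
  cases l with
  | nil => simp [pwcCountRun, pwcRunLengths, pwcAny]
  | cons h t =>
    by_cases he : h = ""
    · subst he
      have hcnt : pwcCountRun "" ("" :: t) = 1 + pwcCountRun "" t := by
        simp [pwcCountRun]
      have hrl : pwcRunLengths ("" :: t)
          = (1 + pwcCountRun "" t) :: pwcRunLengths (t.drop (pwcCountRun "" t)) := by
        rw [pwcRunLengths]
      have hdrop : ("" :: t).drop (1 + pwcCountRun "" t) = t.drop (pwcCountRun "" t) := by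
        simp [Nat.add_comm]
      rw [hcnt, hrl, hdrop]
      simp [pwcAny]
    · have hb : (h == "") = false := by
        simp only [beq_eq_false_iff_ne, ne_eq]
        exact he
      have hcnt : pwcCountRun "" (h :: t) = 0 := by simp [pwcCountRun, hb]
      rw [hcnt]
      simp

-- ===== VERDICT (by name: the statement is the Claim_ definition above) =====
theorem point_win_checker_spec : Claim_equal_point_win_checker := by
  intro check_value points _
  unfold Spec_point_win_checker point_win_checker point_win_checker_alt
  rw [pwcGo_filter, pwcGo'_start]
  rfl
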